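-- pv_equiv track=rewrite | github.com/ermalsalihaj-stu/project | agents/competitive_positioning_agent.py | _build_messaging_pillars
-- ===== SOURCE A (Python) =====
-- from typing import Any, Dict, List
--
-- def _build_messaging_pillars(
--     parity: List[str],
--     diff: List[str],
-- ) -> List[str]:
--     pillars: List[str] = []
--
--     for item in diff[:3]:
--         pillars.append(item)
--
--     generic = [
--         "Transparent billing and usage communication",
--         "Fast, low-friction core flows",
--         "Accessible and inclusive by default",
--     ]
--     for g in generic:
--         if len(pillars) >= 5:
--             break
--         if g not in pillars:
--             pillars.append(g)
--
--     while len(pillars) < 3 and parity: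
--         candidate = parity.pop(0)
--         if candidate not in pillars:
--             pillars.append(candidate)
--
--     return pillars[:5]
-- ===== SOURCE B (Python) =====
-- GENERIC = [
--     "Transparent billing and usage communication",
--     "Fast, low-friction core flows",
--     "Accessible and inclusive by default",
-- ]
--
-- def _build_messaging_pillars(parity, diff):
--     head = diff[:3]
--
--     def pick(ds, gs, room):
--         # single recursive merge of the two streams under a capacity counter
--         if room == 0:
--             return []
--         if ds:
--             return [ds[0]] + pick(ds[1:], gs, room - 1)
--         if gs:
--             g = gs[0]
--             if g in head:
--                 return pick(ds, gs[1:], room)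
--             return [g] + pick(ds, gs[1:], room - 1)
--         return []
--
--     return pick(head, GENERIC, 5)
-- ===== Notes on version B (the rewrite author's own statement) =====
-- stated objective: alternative
-- what changed: Replaces A's three sequential imperative phases (append loop over diff[:3], capped generic loop with break and membership checks against the growing result, unreachable parity while-loop) with one recursive merge of the diff-head and generic streams driven by an explicit capacity counter that counts down from 5.
import Mathlib
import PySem

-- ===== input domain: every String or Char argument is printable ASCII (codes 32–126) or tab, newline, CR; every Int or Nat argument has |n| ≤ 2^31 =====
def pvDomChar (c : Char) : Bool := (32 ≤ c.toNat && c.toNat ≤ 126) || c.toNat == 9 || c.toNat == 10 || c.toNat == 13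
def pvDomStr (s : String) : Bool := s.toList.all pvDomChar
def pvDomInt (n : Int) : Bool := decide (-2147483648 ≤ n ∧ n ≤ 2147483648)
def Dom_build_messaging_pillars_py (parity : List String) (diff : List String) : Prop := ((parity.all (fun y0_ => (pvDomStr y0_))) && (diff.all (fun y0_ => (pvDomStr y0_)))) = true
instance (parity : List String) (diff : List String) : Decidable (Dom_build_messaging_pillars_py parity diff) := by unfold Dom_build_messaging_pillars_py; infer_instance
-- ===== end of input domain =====

-- B replaces A's three imperative phases (diff append loop, capped generic loop with break,
-- unreachable parity while-loop) by one recursive merge of the two streams under a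
-- capacity counter: simpler decomposition, same output.

-- ===== PORT A =====
-- for g in generic: if len(pillars) >= 5: break; if g not in pillars: pillars.append(g)
def pvGenLoop (pillars : List String) : List String → List String
  | [] => pillars
  | g :: gs =>
      if pillars.length ≥ 5 then pillars
      else pvGenLoop (if g ∈ pillars then pillars else pillars ++ [g]) gs

-- while len(pillars) < 3 and parity: candidate = parity.pop(0); if candidate not in pillars: append
def pvWhileLoop (pillars : List String) : List String → List String
  | [] => pillars
  | c :: rest =>
      if pillars.length < 3 then
        pvWhileLoop (if c ∈ pillars then pillars else pillars ++ [c]) rest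
      else pillars

def build_messaging_pillars_py (parity : List String) (diff : List String) : List String :=
  let pillars : List String := (PySem.List.slice diff none (some 3)).foldl (fun acc item => acc ++ [item]) []
  let generic : List String :=
    ["Transparent billing and usage communication",
     "Fast, low-friction core flows",
     "Accessible and inclusive by default"]
  let pillars := pvGenLoop pillars generic
  let pillars := pvWhileLoop pillars parity
  PySem.List.slice pillars none (some 5)

-- ===== PORT B =====
-- def pick(ds, gs, room): recursive merge under a capacity counter
def pvPick (head : List String) : List String → List String → Nat → List String
  | _, _, 0 => []
  | d :: ds, gs, r + 1 => d :: pvPick head ds gs r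
  | [], g :: gs, r + 1 =>
      if g ∈ head then pvPick head [] gs (r + 1)
      else g :: pvPick head [] gs r
  | [], [], _ + 1 => []
termination_by ds gs _ => ds.length + gs.length

def build_messaging_pillars_py_alt (parity : List String) (diff : List String) : List String :=
  let generic : List String :=
    ["Transparent billing and usage communication",
     "Fast, low-friction core flows",
     "Accessible and inclusive by default"]
  let head := PySem.List.slice diff none (some 3)
  pvPick head head generic 5

-- ===== PRECONDITION & SPEC =====
def Spec_build_messaging_pillars_py (parity : List String) (diff : List String) (out : List String) : Prop := out = build_messaging_pillars_py_alt parity diff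
instance (parity : List String) (diff : List String) (out : List String) : Decidable (Spec_build_messaging_pillars_py parity diff out) := by unfold Spec_build_messaging_pillars_py; infer_instance

-- ===== CLAIM (what is proved, stated in full; the proofs are below) =====
def Claim_equal_build_messaging_pillars_py : Prop := ∀ (parity : List String) (diff : List String), Dom_build_messaging_pillars_py parity diff → Spec_build_messaging_pillars_py parity diff (build_messaging_pillars_py parity diff)

-- ===== LEMMAS AND PROOFS =====

theorem pvWhileLoop_of_ge (pillars parity : List String) (h : ¬ pillars.length < 3) :
    pvWhileLoop pillars parity = pillars := by
  cases parity <;> simp [pvWhileLoop, h]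

theorem pv_foldl_append (acc xs : List String) : xs.foldl (fun acc item => acc ++ [item]) acc = acc ++ xs := by
  induction xs generalizing acc with
  | nil => simp
  | cons x xs ih => simp [List.foldl, ih]

theorem pv_main (parity diff : List String) :
    build_messaging_pillars_py parity diff = build_messaging_pillars_py_alt parity diff := by
  have h3 : PySem.List.slice diff none (some 3) = diff.take 3 := by
    rw [show ((3:Int)) = ((3:Nat):Int) from rfl, PySem.List.slice_to_natCast]
  have h5 : ∀ xs : List String, PySem.List.slice xs none (some 5) = xs.take 5 := by
    intro xs
    rw [show ((5:Int)) = ((5:Nat):Int) from rfl, PySem.List.slice_to_natCast]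
  have hne1 : ("Transparent billing and usage communication" : String) ≠ "Fast, low-friction core flows" := by decide
  have hne2 : ("Transparent billing and usage communication" : String) ≠ "Accessible and inclusive by default" := by decide
  have hne3 : ("Fast, low-friction core flows" : String) ≠ "Accessible and inclusive by default" := by decide
  unfold build_messaging_pillars_py build_messaging_pillars_py_alt
  rw [h3, pv_foldl_append, h5]
  simp only [List.nil_append]
  match diff with
  | [] => simp [pvGenLoop, pvPick, pvWhileLoop_of_ge]
  | [a] =>
      by_cases h1 : "Transparent billing and usage communication" = a <;>
      by_cases h2 : "Fast, low-friction core flows" = a <;>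
      by_cases h3 : "Accessible and inclusive by default" = a <;>
      simp_all [pvGenLoop, pvPick, pvWhileLoop_of_ge]
  | [a, b] =>
      by_cases h1a : "Transparent billing and usage communication" = a <;>
      by_cases h1b : "Transparent billing and usage communication" = b <;>
      by_cases h2a : "Fast, low-friction core flows" = a <;>
      by_cases h2b : "Fast, low-friction core flows" = b <;>
      by_cases h3a : "Accessible and inclusive by default" = a <;>
      by_cases h3b : "Accessible and inclusive by default" = b <;>
      simp_all [pvGenLoop, pvPick, pvWhileLoop_of_ge]
  | a :: b :: c :: rest =>
      by_cases h1a : "Transparent billing and usage communication" = a <;>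
      by_cases h1b : "Transparent billing and usage communication" = b <;>
      by_cases h1c : "Transparent billing and usage communication" = c <;>
      by_cases h2a : "Fast, low-friction core flows" = a <;>
      by_cases h2b : "Fast, low-friction core flows" = b <;>
      by_cases h2c : "Fast, low-friction core flows" = c <;>
      by_cases h3a : "Accessible and inclusive by default" = a <;>
      by_cases h3b : "Accessible and inclusive by default" = b <;>
      by_cases h3c : "Accessible and inclusive by default" = c <;>
      simp_all [pvGenLoop, pvPick, pvWhileLoop_of_ge]

-- ===== VERDICT (by name: the statement is the Claim_ definition above) =====
theorem build_messaging_pillars_py_spec : Claim_equal_build_messaging_pillars_py := by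
  intro parity diff _
  exact pv_main parity diff
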